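-- pv_equiv track=rewrite | github.com/Raroford32/OptimizedLLMDeploymenta | app/llm_service.py | _parse_generated_text
-- ===== SOURCE A (Python) =====
-- def _parse_generated_text(generated_text):
--     files = {}
--     current_file = None
--     current_content = []
--
--     for line in generated_text.split('\n'):
--         if line.startswith('## file:'):
--             if current_file:
--                 files[current_file] = '\n'.join(current_content)
--             current_file = line[8:].strip()
--             current_content = []
--         else:
--             current_content.append(line)
--
--     if current_file:
--         files[current_file] = '\n'.join(current_content)
--
--     return files
-- ===== SOURCE B (Python) =====
-- def _parse_generated_text(generated_text):
--     def split_at_header(ls):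
--         body = []
--         k = 0
--         while k < len(ls) and not ls[k].startswith('## file:'):
--             body.append(ls[k])
--             k += 1
--         return body, ls[k:]
--
--     files = {}
--     _, rest = split_at_header(generated_text.split('\n'))
--     while rest:
--         header, tail = rest[0], rest[1:]
--         name = header[8:].strip()
--         body, rest = split_at_header(tail)
--         if name:
--             files[name] = '\n'.join(body)
--     return files
-- ===== Notes on version B (the rewrite author's own statement) =====
-- stated objective: alternative
-- what changed: Replaces A's single pass carrying mutable (current_file, current_content) state with a stateless segment decomposition: skip lines before the first header marker, then repeatedly span off one header plus its body block and insert it.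
import Mathlib
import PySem

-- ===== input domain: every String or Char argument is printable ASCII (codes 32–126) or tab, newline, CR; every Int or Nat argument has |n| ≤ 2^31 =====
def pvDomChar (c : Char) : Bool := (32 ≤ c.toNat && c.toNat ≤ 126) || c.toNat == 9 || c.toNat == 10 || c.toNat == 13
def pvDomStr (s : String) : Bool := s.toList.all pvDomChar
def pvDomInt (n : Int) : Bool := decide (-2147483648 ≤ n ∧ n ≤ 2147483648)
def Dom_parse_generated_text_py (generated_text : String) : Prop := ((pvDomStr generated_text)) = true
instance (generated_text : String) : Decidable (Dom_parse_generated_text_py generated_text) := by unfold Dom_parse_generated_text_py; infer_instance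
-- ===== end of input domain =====

-- B replaces A's one-pass loop with mutable (current_file, current_content) state by a
-- stateless segment decomposition (skip prefix, then repeatedly span off one file block);
-- objective: alternative/simpler decomposition, same cost.

-- ===== PORT A =====
def pvIsHeader (l : String) : Bool := PySem.Str.startswith l "## file:"

def pvName (l : String) : String := PySem.Str.strip (PySem.Str.slice l (some 8) none)

def pvJoin (cc : List String) : String := PySem.Str.join "\n" cc

-- Python `if current_file: files[current_file] = '\n'.join(current_content)`
-- (current_file is None or a str; '' is falsy)
def pvFlush (files : PySem.Dict String String) (cf : Option String) (cc : List String) :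
    PySem.Dict String String :=
  match cf with
  | none => files
  | some f => if f ≠ "" then files.insert f (pvJoin cc) else files

def pvFinish (st : PySem.Dict String String × Option String × List String) :
    PySem.Dict String String :=
  pvFlush st.1 st.2.1 st.2.2

def pvStepA (st : PySem.Dict String String × Option String × List String) (line : String) :
    PySem.Dict String String × Option String × List String :=
  if pvIsHeader line then
    (pvFlush st.1 st.2.1 st.2.2, some (pvName line), [])
  else
    (st.1, st.2.1, st.2.2 ++ [line])

def parse_generated_text_py (generated_text : String) : List (String × String) :=
  (pvFinish (((PySem.Str.split? generated_text "\n").getD []).foldl pvStepA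
    (PySem.Dict.empty, none, []))).items

-- ===== PORT B =====
-- split_at_header(ls) = (lines before the first header, rest from the first header on)
def pvSplitAtHeader (ls : List String) : List String × List String :=
  (ls.takeWhile (fun x => !pvIsHeader x), ls.dropWhile (fun x => !pvIsHeader x))

def pvLoopB : List String → PySem.Dict String String → PySem.Dict String String
  | [], files => files
  | header :: tail, files =>
      let name := pvName header
      let body := (pvSplitAtHeader tail).1
      let rest := (pvSplitAtHeader tail).2
      pvLoopB rest (if name ≠ "" then files.insert name (pvJoin body) else files)
  termination_by ls _ => ls.length
  decreasing_by
    simp only [pvSplitAtHeader]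
    exact Nat.lt_succ_of_le (List.length_dropWhile_le _ _)

def parse_generated_text_py_alt (generated_text : String) : List (String × String) :=
  (pvLoopB (pvSplitAtHeader ((PySem.Str.split? generated_text "\n").getD [])).2
    PySem.Dict.empty).items

-- ===== PRECONDITION & SPEC =====
def Spec_parse_generated_text_py (generated_text : String) (out : List (String × String)) : Prop := out = parse_generated_text_py_alt generated_text
instance (generated_text : String) (out : List (String × String)) : Decidable (Spec_parse_generated_text_py generated_text out) := by unfold Spec_parse_generated_text_py; infer_instance

-- ===== CLAIM (what is proved, stated in full; the proofs are below) =====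
def Claim_equal_parse_generated_text_py : Prop := ∀ (generated_text : String), Dom_parse_generated_text_py generated_text → Spec_parse_generated_text_py generated_text (parse_generated_text_py generated_text)

-- ===== LEMMAS AND PROOFS =====
theorem pvFold_some (ls : List String) :
    ∀ (files : PySem.Dict String String) (f : String) (cc : List String),
      pvFinish (ls.foldl pvStepA (files, some f, cc)) =
        pvLoopB (ls.dropWhile (fun x => !pvIsHeader x))
          (pvFlush files (some f) (cc ++ ls.takeWhile (fun x => !pvIsHeader x))) := by
  induction ls with
  | nil => intro files f cc; simp [pvLoopB, pvFinish]
  | cons l ls ih =>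
      intro files f cc
      by_cases h : pvIsHeader l = true
      · simp only [List.foldl_cons, pvStepA, h, if_pos, List.dropWhile_cons, List.takeWhile_cons,
          Bool.not_true, Bool.false_eq_true, if_false]
        rw [ih]
        simp [pvLoopB, pvSplitAtHeader, pvFlush]
      · simp only [Bool.not_eq_true] at h
        simp only [List.foldl_cons, pvStepA, h, Bool.false_eq_true, if_false,
          List.dropWhile_cons, List.takeWhile_cons, Bool.not_false, if_true]
        rw [ih]
        simp [pvFlush]

theorem pvFold_none (ls : List String) :
    ∀ (files : PySem.Dict String String) (cc : List String),
      pvFinish (ls.foldl pvStepA (files, none, cc)) =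
        pvLoopB (ls.dropWhile (fun x => !pvIsHeader x)) files := by
  induction ls with
  | nil => intro files cc; simp [pvLoopB, pvFinish, pvFlush]
  | cons l ls ih =>
      intro files cc
      by_cases h : pvIsHeader l = true
      · simp only [List.foldl_cons, pvStepA, h, if_pos, List.dropWhile_cons,
          Bool.not_true, Bool.false_eq_true, if_false]
        rw [pvFold_some]
        simp [pvLoopB, pvSplitAtHeader, pvFlush]
      · simp only [Bool.not_eq_true] at h
        simp only [List.foldl_cons, pvStepA, h, Bool.false_eq_true, if_false,
          List.dropWhile_cons, Bool.not_false, if_true]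
        exact ih files (cc ++ [l])

-- ===== VERDICT (by name: the statement is the Claim_ definition above) =====
theorem parse_generated_text_py_spec : Claim_equal_parse_generated_text_py := by
  intro t _
  unfold Spec_parse_generated_text_py parse_generated_text_py parse_generated_text_py_alt
  rw [pvFold_none]
  rfl
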